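-- pv_equiv track=rewrite | github.com/juanluera/6.S965 | final_project/sim/cordic_test.py | twos_complement_to_hex
-- ===== SOURCE A (Python) =====
-- def twos_complement_to_hex(number, bits=16):
--     # Take absolute value
--     if number >= 0:
--         return hex(number)
--     abs_number = abs(number)
--
--     # Convert to binary with specified bit width
--     bin_abs = format(abs_number, f'0{bits}b')
--
--     # Negate all bits (1s become 0s and vice versa)
--     inverted_bin = ''.join('1' if b == '0' else '0' for b in bin_abs)
--
--     # Add 1 to the result (converting from binary string to int first)
--     twos_complement = int(inverted_bin, 2) + 1
--
--     # Convert to hexadecimal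
--     hex_result = hex(twos_complement)
--
--     return hex_result
-- ===== SOURCE B (Python) =====
-- def twos_complement_to_hex(number, bits=16):
--     if number >= 0:
--         return hex(number)
--     width = max(bits, (-number).bit_length())
--     return hex((1 << width) + number)
-- ===== Notes on version B (the rewrite author's own statement) =====
-- stated objective: simpler
-- what changed: replaces A's binary-string formatting, per-character bit inversion, re-parse and +1 with the closed-form hex((1 << max(bits, bit_length)) + number), since inverting all bits and adding one equals 2^width + number; no string building remains
import Mathlib
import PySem

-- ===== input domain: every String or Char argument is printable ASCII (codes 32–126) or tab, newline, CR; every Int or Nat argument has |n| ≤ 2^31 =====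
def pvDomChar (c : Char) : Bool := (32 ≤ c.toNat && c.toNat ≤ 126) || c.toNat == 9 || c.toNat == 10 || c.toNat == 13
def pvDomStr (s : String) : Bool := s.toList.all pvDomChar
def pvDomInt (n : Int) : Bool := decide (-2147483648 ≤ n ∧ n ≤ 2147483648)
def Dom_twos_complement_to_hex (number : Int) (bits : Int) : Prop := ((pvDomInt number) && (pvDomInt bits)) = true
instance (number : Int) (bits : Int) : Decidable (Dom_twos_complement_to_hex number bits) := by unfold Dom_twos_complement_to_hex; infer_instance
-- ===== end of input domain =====

-- B replaces A's binary-string formatting / bit-inversion / re-parse with the closed form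
-- hex((1 << max(bits, bit_length)) + number); equivalence of the RETURN values is proved on Pre_.

-- shared helper: Python's built-in hex(n) for n ≥ 0 (both Pythons call the same built-in)
def hexDigits (n : Nat) : List Char :=
  if h : n = 0 then [] else hexDigits (n / 16) ++ [Nat.digitChar (n % 16)]
decreasing_by exact Nat.div_lt_self (Nat.pos_of_ne_zero h) (by norm_num)

def pyHex (n : Nat) : String := "0x" ++ (if n = 0 then "0" else String.ofList (hexDigits n))

-- ===== PORT A =====
-- binary digits of n, msb first (empty for 0); format(n,'b') is natBin, zero-padding is binPad
def natBinAux (n : Nat) : List Char :=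
  if h : n = 0 then [] else natBinAux (n / 2) ++ [if n % 2 = 1 then '1' else '0']
decreasing_by exact Nat.div_lt_self (Nat.pos_of_ne_zero h) (by norm_num)

def natBin (n : Nat) : List Char := if n = 0 then ['0'] else natBinAux n

-- format(n, f'0{w}b')
def binPad (n w : Nat) : List Char :=
  let s := natBin n
  List.replicate (w - s.length) '0' ++ s

-- int(s, 2) on a string of '0'/'1' characters
def parse2 (s : List Char) : Nat := s.foldl (fun acc c => 2 * acc + (if c = '1' then 1 else 0)) 0

def twos_complement_to_hex (number : Int) (bits : Int) : String :=
  if number ≥ 0 then pyHex number.toNat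
  else
    let abs_number := number.natAbs
    let bin_abs := binPad abs_number bits.toNat
    let inverted_bin := bin_abs.map (fun b => if b = '0' then '1' else '0')
    let twos_complement := parse2 inverted_bin + 1
    pyHex twos_complement

-- ===== PORT B =====
-- (-number).bit_length()
def bitLength (n : Nat) : Nat :=
  if h : n = 0 then 0 else bitLength (n / 2) + 1
decreasing_by exact Nat.div_lt_self (Nat.pos_of_ne_zero h) (by norm_num)

def twos_complement_to_hex_alt (number : Int) (bits : Int) : String :=
  if number ≥ 0 then pyHex number.toNat
  else
    let width := max bits (Int.ofNat (bitLength (-number).toNat))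
    -- 1 << width (width ≥ 1 here since number < 0)
    pyHex ((2 ^ width.toNat : Int) + number).toNat

-- ===== PRECONDITION & SPEC =====
-- Pre_ excludes exactly the inputs where A raises: number < 0 with bits < 0 makes
-- format's specifier f'0{bits}b' invalid (ValueError).
def Pre_twos_complement_to_hex (number : Int) (bits : Int) : Prop := number < 0 → 0 ≤ bits
instance (number : Int) (bits : Int) : Decidable (Pre_twos_complement_to_hex number bits) := by
  unfold Pre_twos_complement_to_hex; infer_instance

def pvWitness_twos_complement_to_hex : Int × Int := (-5, 16)

def Spec_twos_complement_to_hex (number : Int) (bits : Int) (out : String) : Prop :=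
  out = twos_complement_to_hex_alt number bits
instance (number : Int) (bits : Int) (out : String) : Decidable (Spec_twos_complement_to_hex number bits out) := by
  unfold Spec_twos_complement_to_hex; infer_instance

-- ===== CLAIM (what is proved, stated in full; the proofs are below) =====
def Claim_equal_twos_complement_to_hex : Prop := ∀ (number : Int) (bits : Int), Dom_twos_complement_to_hex number bits → Pre_twos_complement_to_hex number bits → Spec_twos_complement_to_hex number bits (twos_complement_to_hex number bits)

-- ===== LEMMAS AND PROOFS =====

-- folding parse2's step over a list of binary digits and over its bitwise inversion:
-- the two results (from accumulators x, y) sum with 1 to (x+y+1)·2^len.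
theorem parse2_inv_sum (s : List Char) (hb : ∀ c ∈ s, c = '0' ∨ c = '1') (x y : Nat) :
    s.foldl (fun acc c => 2 * acc + (if c = '1' then 1 else 0)) x
      + (s.map (fun b => if b = '0' then '1' else '0')).foldl
          (fun acc c => 2 * acc + (if c = '1' then 1 else 0)) y
      + 1 = (x + y + 1) * 2 ^ s.length := by
  induction s generalizing x y with
  | nil => simp
  | cons c t ih =>
    have hc := hb c (by simp)
    have ht : ∀ c ∈ t, c = '0' ∨ c = '1' := fun d hd => hb d (by simp [hd])
    rcases hc with h | h <;> subst h <;>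
      simp only [List.map_cons, List.foldl_cons, List.length_cons] <;>
      rw [ih ht] <;> simp <;> ring

theorem foldl_natBinAux (n : Nat) : ∀ x,
    (natBinAux n).foldl (fun acc c => 2 * acc + (if c = '1' then 1 else 0)) x
      = x * 2 ^ (natBinAux n).length + n := by
  induction n using Nat.strong_induction_on with
  | _ n ih =>
    intro x
    rw [natBinAux]
    by_cases h : n = 0
    · simp [h]
    · have hlt : n / 2 < n := Nat.div_lt_self (Nat.pos_of_ne_zero h) (by norm_num)
      rw [dif_neg h]
      simp only [List.foldl_append, List.foldl_cons, List.foldl_nil,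
        List.length_append, List.length_cons, List.length_nil]
      rw [ih _ hlt]
      have h2 := Nat.div_add_mod n 2
      have hm : n % 2 = 1 ∨ n % 2 = 0 := by omega
      rcases hm with hm | hm <;> simp [hm, pow_succ] <;> ring_nf <;> omega

theorem natBinAux_binary (n : Nat) : ∀ c ∈ natBinAux n, c = '0' ∨ c = '1' := by
  induction n using Nat.strong_induction_on with
  | _ n ih =>
    intro c hc
    rw [natBinAux] at hc
    by_cases h : n = 0
    · simp [h] at hc
    · have hlt : n / 2 < n := Nat.div_lt_self (Nat.pos_of_ne_zero h) (by norm_num)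
      rw [dif_neg h] at hc
      simp only [List.mem_append, List.mem_singleton] at hc
      rcases hc with hc | hc
      · exact ih _ hlt c hc
      · subst hc; split <;> simp

theorem natBinAux_length (n : Nat) : (natBinAux n).length = bitLength n := by
  induction n using Nat.strong_induction_on with
  | _ n ih =>
    rw [natBinAux, bitLength]
    by_cases h : n = 0
    · simp [h]
    · have hlt : n / 2 < n := Nat.div_lt_self (Nat.pos_of_ne_zero h) (by norm_num)
      rw [dif_neg h, dif_neg h]
      simp [ih _ hlt]

theorem lt_two_pow_bitLength (n : Nat) : n < 2 ^ bitLength n := by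
  induction n using Nat.strong_induction_on with
  | _ n ih =>
    rw [bitLength]
    by_cases h : n = 0
    · simp [h]
    · have hlt : n / 2 < n := Nat.div_lt_self (Nat.pos_of_ne_zero h) (by norm_num)
      have := ih _ hlt
      rw [dif_neg h, pow_succ]
      omega

-- parse2 of the padded binary rendering of n is n, and its length is max w (bitLength n) for n ≠ 0
theorem parse2_binPad (n w : Nat) (hn : n ≠ 0) : parse2 (binPad n w) = n := by
  unfold parse2 binPad natBin
  simp only [hn, if_false]
  rw [List.foldl_append]
  have hz : ∀ k x, (List.replicate k '0').foldl
      (fun acc c => 2 * acc + (if c = '1' then 1 else 0)) x = x * 2 ^ k := by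
    intro k
    induction k with
    | zero => simp
    | succ k ih => intro x; simp [List.replicate_succ, ih, pow_succ]; ring
  rw [hz, foldl_natBinAux]
  simp

theorem binPad_length (n w : Nat) (hn : n ≠ 0) :
    (binPad n w).length = max w (bitLength n) := by
  unfold binPad natBin
  simp only [hn, if_false, List.length_append, List.length_replicate, natBinAux_length]
  omega

-- ===== VERDICT (by name: the statement is the Claim_ definition above) =====
theorem twos_complement_to_hex_spec : Claim_equal_twos_complement_to_hex := by
  intro number bits _ hpre
  unfold Spec_twos_complement_to_hex twos_complement_to_hex twos_complement_to_hex_alt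
  by_cases hn : number ≥ 0
  · simp [hn]
  · simp only [hn, if_false]
    have hneg : number < 0 := by omega
    have hb : 0 ≤ bits := hpre hneg
    set a := number.natAbs with ha
    have ha0 : a ≠ 0 := by simp [ha]; omega
    -- A's value: parse2 (map inv (binPad a bits.toNat)) + 1 = 2 ^ L - a
    have hbin : ∀ c ∈ binPad a bits.toNat, c = '0' ∨ c = '1' := by
      intro c hc
      unfold binPad natBin at hc
      simp only [ha0, if_false, List.mem_append, List.mem_replicate] at hc
      rcases hc with hc | hc
      · exact Or.inl hc.2
      · exact natBinAux_binary a c hc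
    have hsum : parse2 (binPad a bits.toNat)
        + parse2 ((binPad a bits.toNat).map (fun b => if b = '0' then '1' else '0')) + 1
        = (0 + 0 + 1) * 2 ^ (binPad a bits.toNat).length :=
      parse2_inv_sum (binPad a bits.toNat) hbin 0 0
    rw [parse2_binPad a bits.toNat ha0] at hsum
    norm_num at hsum
    have hL : (binPad a bits.toNat).length = max bits.toNat (bitLength a) :=
      binPad_length a bits.toNat ha0
    set L := max bits.toNat (bitLength a) with hLdef
    have haL : a < 2 ^ L := lt_of_lt_of_le (lt_two_pow_bitLength a)
      (Nat.pow_le_pow_right (by norm_num) (le_max_right _ _))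
    have hA : parse2 ((binPad a bits.toNat).map (fun b => if b = '0' then '1' else '0')) + 1
        = 2 ^ L - a := by
      rw [hL] at hsum
      omega
    rw [hA]
    -- B's value equals the same natural number
    congr 1
    have hwidth : (max bits (Int.ofNat (bitLength ((-number).toNat)))).toNat = L := by
      have : (-number).toNat = a := by omega
      rw [this, hLdef, Int.ofNat_eq_natCast]
      omega
    rw [hwidth]
    have h2L : ((2 : Int) ^ L) = ((2 ^ L : Nat) : Int) := by push_cast; ring
    rw [h2L]
    omega
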